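-- pv_equiv track=rewrite | github.com/tranquiliste/AstroCat | app/main.py | _canonical_filter_name
-- ===== SOURCE A (Python) =====
-- from typing import TYPE_CHECKING, Callable, Dict, List, Optional, Tuple
--
-- def _canonical_filter_name(name: str) -> Optional[str]:
--     raw = (name or "").strip().upper()
--     if not raw:
--         return None
--
--     normalized = "".join(ch for ch in raw if ("A" <= ch <= "Z") or ("0" <= ch <= "9"))
--     if normalized in {"L", "LUM", "LUMINANCE"}:
--         return "L"
--     if normalized in {"R", "RED"}:
--         return "R"
--     if normalized in {"G", "GREEN"}:
--         return "G"
--     if normalized in {"B", "BLUE"}: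
--         return "B"
--     if normalized in {"S", "SII", "S2"}:
--         return "S"
--     if normalized in {"H", "HA", "HALPHA","Hα"}:
--         return "H"
--     if normalized in {"O", "OIII", "O3"}:
--         return "O"
--     return None
-- ===== SOURCE B (Python) =====
-- _ALIASES = ("L", "LUM", "LUMINANCE", "R", "RED", "G", "GREEN", "B", "BLUE",
--             "S", "SII", "S2", "H", "HA", "HALPHA", "O", "OIII", "O3")
--
--
-- def _build_dfa(aliases):
--     # Trie/DFA over alias prefixes: states are prefix strings, accepting states the aliases.
--     trans = {}
--     accept = set()
--     for alias in aliases: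
--         for i in range(len(alias)):
--             trans[(alias[:i], alias[i])] = alias[:i + 1]
--         accept.add(alias)
--     return trans, accept
--
--
-- _TRANS, _ACCEPT = _build_dfa(_ALIASES)
--
--
-- def _canonical_filter_name(name):
--     state = ""
--     for ch in (name or "").upper():
--         if "A" <= ch <= "Z" or "0" <= ch <= "9":
--             state = _TRANS.get((state, ch))
--             if state is None:
--                 return None
--     return state[0] if state in _ACCEPT else None
-- ===== Notes on version B (the rewrite author's own statement) =====
-- stated objective: faster
-- what changed: A normalizes the whole string first and then tests the normalized copy against seven alias sets in sequence; B never builds the normalized string: it builds a trie/DFA over alias prefixes once (transitions keyed by (prefix, char)), makes a single fused pass that filters each character and advances the automaton, returning None at the first dead transition, and reads the canonical code off the accepted state's first character instead of storing codes at all.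
import Mathlib
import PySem

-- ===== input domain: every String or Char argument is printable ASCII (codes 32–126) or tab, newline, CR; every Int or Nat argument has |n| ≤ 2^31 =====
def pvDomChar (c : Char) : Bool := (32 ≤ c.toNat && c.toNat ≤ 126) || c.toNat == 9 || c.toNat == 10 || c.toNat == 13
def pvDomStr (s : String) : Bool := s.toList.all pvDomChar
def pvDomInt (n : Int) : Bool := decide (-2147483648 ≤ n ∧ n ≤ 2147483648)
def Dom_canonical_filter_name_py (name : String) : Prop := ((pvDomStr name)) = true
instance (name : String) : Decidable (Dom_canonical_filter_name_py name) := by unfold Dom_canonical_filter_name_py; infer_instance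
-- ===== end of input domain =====

-- B replaces A's normalize-then-seven-membership-chain by a single early-exiting pass over a precomputed trie/DFA of alias prefixes, reading the code off the accepted state (objective: faster, measured).


set_option maxRecDepth 10000
set_option maxHeartbeats 1000000

-- the filter predicate ("A" <= ch <= "Z") or ("0" <= ch <= "9"), textually shared by A and B
def pvPred (ch : Char) : Bool := decide ('A' ≤ ch ∧ ch ≤ 'Z') || decide ('0' ≤ ch ∧ ch ≤ '9')

-- ===== PORT A =====
def canonical_filter_name_py (name : String) : Option String :=
  let raw := PySem.Str.upper (PySem.Str.strip name)   -- (name or "") is name itself for a String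
  if raw = "" then none
  else
    let normalized := String.ofList (raw.toList.filter pvPred)
    if normalized = "L" ∨ normalized = "LUM" ∨ normalized = "LUMINANCE" then some "L"
    else if normalized = "R" ∨ normalized = "RED" then some "R"
    else if normalized = "G" ∨ normalized = "GREEN" then some "G"
    else if normalized = "B" ∨ normalized = "BLUE" then some "B"
    else if normalized = "S" ∨ normalized = "SII" ∨ normalized = "S2" then some "S"
    else if normalized = "H" ∨ normalized = "HA" ∨ normalized = "HALPHA" ∨ normalized = "Hα" then some "H"
    else if normalized = "O" ∨ normalized = "OIII" ∨ normalized = "O3" then some "O"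
    else none

-- ===== PORT B =====
def pvAliases : List String :=
  ["L", "LUM", "LUMINANCE", "R", "RED", "G", "GREEN", "B", "BLUE",
   "S", "SII", "S2", "H", "HA", "HALPHA", "O", "OIII", "O3"]

-- _build_dfa: states are alias prefixes (strings), transitions keyed by (prefix, char)
def pvBuildDfa : PySem.Dict (String × Char) String × PySem.Set String :=
  pvAliases.foldl
    (fun acc al =>
      let trans := (List.range al.toList.length).foldl
        (fun t i => t.insert (String.ofList (al.toList.take i), al.toList.getD i ' ')
                             (String.ofList (al.toList.take (i + 1)))) acc.1
      (trans, acc.2.add al))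
    (PySem.Dict.mk [], PySem.Set.ofList [])

def pvTrans : PySem.Dict (String × Char) String := pvBuildDfa.1
def pvAccept : PySem.Set String := pvBuildDfa.2

-- the loop of _canonical_filter_name: filter each char, advance the automaton, bail out when dead
def pvRun : String → List Char → Option String
  | state, [] => some state
  | state, c :: cs =>
      if pvPred c then
        match pvTrans.get? (state, c) with
        | none => none
        | some s' => pvRun s' cs
      else pvRun state cs

def canonical_filter_name_py_alt (name : String) : Option String :=
  match pvRun "" (PySem.Str.upper name).toList with
  | none => none
  | some state =>
      if pvAccept.contains state then
        match PySem.Str.pyGet? state 0 with   -- state[0]: a 1-char Python str, built back into a String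
        | none => none
        | some c => some (String.ofList [c])
      else none

-- ===== PRECONDITION & SPEC =====
def Spec_canonical_filter_name_py (name : String) (out : Option String) : Prop := out = canonical_filter_name_py_alt name
instance (name : String) (out : Option String) : Decidable (Spec_canonical_filter_name_py name out) := by unfold Spec_canonical_filter_name_py; infer_instance

-- ===== CLAIM (what is proved, stated in full; the proofs are below) =====
def Claim_equal_canonical_filter_name_py : Prop := ∀ (name : String), Dom_canonical_filter_name_py name → Spec_canonical_filter_name_py name (canonical_filter_name_py name)

-- ===== LEMMAS AND PROOFS =====

-- filter-free form of the automaton loop (proof helper)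
def pvRunP : String → List Char → Option String
  | state, [] => some state
  | state, c :: cs =>
      match pvTrans.get? (state, c) with
      | none => none
      | some s' => pvRunP s' cs

lemma pvRun_eq_runP_filter (s : String) (cs : List Char) :
    pvRun s cs = pvRunP s (cs.filter pvPred) := by
  induction cs generalizing s with
  | nil => rfl
  | cons c cs ih =>
    by_cases h : pvPred c = true
    · simp [pvRun, pvRunP, List.filter, h]
      cases pvTrans.get? (s, c) <;> simp [ih]
    · simp [pvRun, List.filter, h, ih]

-- every transition value of the trie is key-prefix extended by the key's character
lemma pvGet?_mk_push (l : List ((String × Char) × String))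
    (hl : ∀ e ∈ l, e.2 = e.1.1.push e.1.2) (s : String) (c : Char) (t : String)
    (h : (PySem.Dict.mk l).get? (s, c) = some t) : t = s.push c := by
  induction l with
  | nil =>
    rw [show (PySem.Dict.mk ([] : List ((String × Char) × String))).get? (s, c) = none from rfl] at h
    simp at h
  | cons e es ih =>
    rw [show (PySem.Dict.mk (e :: es)).get? (s, c)
          = if e.1 == (s, c) then some e.2 else (PySem.Dict.mk es).get? (s, c) from
        PySem.Dict.get?_mk_cons ..] at h
    by_cases hc : e.1 == (s, c)
    · rw [if_pos hc] at h
      injection h with h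
      have := hl e (List.mem_cons_self ..)
      have hk : e.1 = (s, c) := eq_of_beq hc
      rw [← h, this, hk]
    · rw [if_neg hc] at h
      exact ih (fun e he => hl e (List.mem_cons_of_mem _ he)) h

lemma pvTrans_val (s : String) (c : Char) (t : String)
    (h : pvTrans.get? (s, c) = some t) : t = s.push c := by
  have htab : pvTrans = PySem.Dict.mk
      [(("", 'L'), "L"), (("L", 'U'), "LU"), (("LU", 'M'), "LUM"),
       (("LUM", 'I'), "LUMI"), (("LUMI", 'N'), "LUMIN"), (("LUMIN", 'A'), "LUMINA"),
       (("LUMINA", 'N'), "LUMINAN"), (("LUMINAN", 'C'), "LUMINANC"), (("LUMINANC", 'E'), "LUMINANCE"),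
       (("", 'R'), "R"), (("R", 'E'), "RE"), (("RE", 'D'), "RED"),
       (("", 'G'), "G"), (("G", 'R'), "GR"), (("GR", 'E'), "GRE"), (("GRE", 'E'), "GREE"), (("GREE", 'N'), "GREEN"),
       (("", 'B'), "B"), (("B", 'L'), "BL"), (("BL", 'U'), "BLU"), (("BLU", 'E'), "BLUE"),
       (("", 'S'), "S"), (("S", 'I'), "SI"), (("SI", 'I'), "SII"), (("S", '2'), "S2"),
       (("", 'H'), "H"), (("H", 'A'), "HA"), (("HA", 'L'), "HAL"), (("HAL", 'P'), "HALP"),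
       (("HALP", 'H'), "HALPH"), (("HALPH", 'A'), "HALPHA"),
       (("", 'O'), "O"), (("O", 'I'), "OI"), (("OI", 'I'), "OII"), (("OII", 'I'), "OIII"), (("O", '3'), "O3")] := by
    decide
  rw [htab] at h
  exact pvGet?_mk_push _ (by decide) s c t h

-- a successful run only ever extends the state by the consumed characters
lemma pvRunP_result (cs : List Char) (s t : String)
    (h : pvRunP s cs = some t) : t.toList = s.toList ++ cs := by
  induction cs generalizing s with
  | nil =>
    injection h with h
    rw [← h, List.append_nil]
  | cons c cs ih =>
    simp only [pvRunP] at h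
    cases hg : pvTrans.get? (s, c) with
    | none => rw [hg] at h; simp at h
    | some s' =>
      rw [hg] at h
      have hs' := pvTrans_val s c s' hg
      subst hs'
      rw [ih _ h, String.toList_push]
      simp

-- the accepted states are exactly the aliases
lemma pvAccept_eq : pvAccept = ["L", "LUM", "LUMINANCE", "R", "RED", "G", "GREEN", "B", "BLUE",
    "S", "SII", "S2", "H", "HA", "HALPHA", "O", "OIII", "O3"] := by decide

-- whitespace never survives the A-Z0-9 filter, even after upper-casing
lemma pvPred_upper_isspace (c : Char) (h : PySem.Chars.isspace c = true) :
    pvPred (PySem.Chars.upperChar c) = false := by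
  simp only [PySem.Chars.isspace, Bool.or_eq_true, Bool.and_eq_true, decide_eq_true_eq,
    Char.toNat] at h
  have hlow : PySem.Chars.islower c = false := by
    simp only [PySem.Chars.islower, Bool.and_eq_false_iff, decide_eq_false_iff_not, Char.le_def,
      UInt32.le_iff_toNat_le, show 'a'.val.toNat = 97 from rfl, show 'z'.val.toNat = 122 from rfl]
    show _ ∨ _
    omega
  simp only [PySem.Chars.upperChar, hlow, Bool.false_eq_true, if_false]
  simp only [pvPred, Bool.or_eq_false_iff, decide_eq_false_iff_not, Char.le_def,
    UInt32.le_iff_toNat_le, not_and, show 'A'.val.toNat = 65 from rfl,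
    show 'Z'.val.toNat = 90 from rfl, show '0'.val.toNat = 48 from rfl,
    show '9'.val.toNat = 57 from rfl]
  constructor <;> intro <;> omega

lemma pvFilter_map_dropWhile (l : List Char) :
    ((l.dropWhile PySem.Chars.isspace).map PySem.Chars.upperChar).filter pvPred
      = (l.map PySem.Chars.upperChar).filter pvPred := by
  conv_rhs => rw [← List.takeWhile_append_dropWhile (p := PySem.Chars.isspace) (l := l)]
  rw [List.map_append, List.filter_append]
  have : ((l.takeWhile PySem.Chars.isspace).map PySem.Chars.upperChar).filter pvPred = [] := by
    rw [List.filter_eq_nil_iff]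
    intro a ha
    rcases List.mem_map.mp ha with ⟨c, hc, rfl⟩
    exact (pvPred_upper_isspace c (List.mem_takeWhile_imp hc)) ▸ Bool.false_ne_true
  rw [this, List.nil_append]

-- filtering to A-Z0-9 after upper-casing ignores the strip
lemma pvFilter_upper_strip (l : List Char) :
    (PySem.Chars.upper (PySem.Chars.strip l)).filter pvPred
      = (PySem.Chars.upper l).filter pvPred := by
  simp only [PySem.Chars.upper, PySem.Chars.strip, PySem.Chars.rstrip, PySem.Chars.lstrip]
  rw [List.map_reverse, List.filter_reverse, pvFilter_map_dropWhile, ← List.filter_reverse,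
      ← List.map_reverse, List.reverse_reverse, pvFilter_map_dropWhile]

-- core: on any filtered character list, A's membership chain equals the automaton's verdict
lemma pvCore (k : List Char) (hk : ∀ c ∈ k, pvPred c = true) :
    (if String.ofList k = "L" ∨ String.ofList k = "LUM" ∨ String.ofList k = "LUMINANCE" then some "L"
     else if String.ofList k = "R" ∨ String.ofList k = "RED" then some "R"
     else if String.ofList k = "G" ∨ String.ofList k = "GREEN" then some "G"
     else if String.ofList k = "B" ∨ String.ofList k = "BLUE" then some "B"
     else if String.ofList k = "S" ∨ String.ofList k = "SII" ∨ String.ofList k = "S2" then some "S"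
     else if String.ofList k = "H" ∨ String.ofList k = "HA" ∨ String.ofList k = "HALPHA" ∨ String.ofList k = "Hα" then some "H"
     else if String.ofList k = "O" ∨ String.ofList k = "OIII" ∨ String.ofList k = "O3" then some "O"
     else none)
    = (match pvRunP "" k with
       | none => none
       | some state =>
           if pvAccept.contains state then
             match PySem.Str.pyGet? state 0 with
             | none => none
             | some c => some (String.ofList [c])
           else none) := by
  by_cases h1 : String.ofList k = "L"
  · have hkk : k = "L".toList := by
      have := congrArg String.toList h1; rwa [String.toList_ofList] at this
    subst hkk; decide
  by_cases h2 : String.ofList k = "LUM"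
  · have hkk : k = "LUM".toList := by
      have := congrArg String.toList h2; rwa [String.toList_ofList] at this
    subst hkk; decide
  by_cases h3 : String.ofList k = "LUMINANCE"
  · have hkk : k = "LUMINANCE".toList := by
      have := congrArg String.toList h3; rwa [String.toList_ofList] at this
    subst hkk; decide
  by_cases h4 : String.ofList k = "R"
  · have hkk : k = "R".toList := by
      have := congrArg String.toList h4; rwa [String.toList_ofList] at this
    subst hkk; decide
  by_cases h5 : String.ofList k = "RED"
  · have hkk : k = "RED".toList := by
      have := congrArg String.toList h5; rwa [String.toList_ofList] at this
    subst hkk; decide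
  by_cases h6 : String.ofList k = "G"
  · have hkk : k = "G".toList := by
      have := congrArg String.toList h6; rwa [String.toList_ofList] at this
    subst hkk; decide
  by_cases h7 : String.ofList k = "GREEN"
  · have hkk : k = "GREEN".toList := by
      have := congrArg String.toList h7; rwa [String.toList_ofList] at this
    subst hkk; decide
  by_cases h8 : String.ofList k = "B"
  · have hkk : k = "B".toList := by
      have := congrArg String.toList h8; rwa [String.toList_ofList] at this
    subst hkk; decide
  by_cases h9 : String.ofList k = "BLUE"
  · have hkk : k = "BLUE".toList := by
      have := congrArg String.toList h9; rwa [String.toList_ofList] at this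
    subst hkk; decide
  by_cases h10 : String.ofList k = "S"
  · have hkk : k = "S".toList := by
      have := congrArg String.toList h10; rwa [String.toList_ofList] at this
    subst hkk; decide
  by_cases h11 : String.ofList k = "SII"
  · have hkk : k = "SII".toList := by
      have := congrArg String.toList h11; rwa [String.toList_ofList] at this
    subst hkk; decide
  by_cases h12 : String.ofList k = "S2"
  · have hkk : k = "S2".toList := by
      have := congrArg String.toList h12; rwa [String.toList_ofList] at this
    subst hkk; decide
  by_cases h13 : String.ofList k = "H"
  · have hkk : k = "H".toList := by
      have := congrArg String.toList h13; rwa [String.toList_ofList] at this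
    subst hkk; decide
  by_cases h14 : String.ofList k = "HA"
  · have hkk : k = "HA".toList := by
      have := congrArg String.toList h14; rwa [String.toList_ofList] at this
    subst hkk; decide
  by_cases h15 : String.ofList k = "HALPHA"
  · have hkk : k = "HALPHA".toList := by
      have := congrArg String.toList h15; rwa [String.toList_ofList] at this
    subst hkk; decide
  by_cases h16 : String.ofList k = "O"
  · have hkk : k = "O".toList := by
      have := congrArg String.toList h16; rwa [String.toList_ofList] at this
    subst hkk; decide
  by_cases h17 : String.ofList k = "OIII"
  · have hkk : k = "OIII".toList := by
      have := congrArg String.toList h17; rwa [String.toList_ofList] at this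
    subst hkk; decide
  by_cases h18 : String.ofList k = "O3"
  · have hkk : k = "O3".toList := by
      have := congrArg String.toList h18; rwa [String.toList_ofList] at this
    subst hkk; decide
  have hα : String.ofList k ≠ "Hα" := by
    intro hx
    have hkk : k = "Hα".toList := by
      have := congrArg String.toList hx; rwa [String.toList_ofList] at this
    have := hk 'α' (by rw [hkk]; decide)
    simp [pvPred] at this
  rw [if_neg (by simp [h1, h2, h3]), if_neg (by simp [h4, h5]), if_neg (by simp [h6, h7]),
      if_neg (by simp [h8, h9]), if_neg (by simp [h10, h11, h12]),
      if_neg (by simp [h13, h14, h15, hα]), if_neg (by simp [h16, h17, h18])]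
  cases hrun : pvRunP "" k with
  | none => rfl
  | some t =>
    have ht : t = String.ofList k := by
      have h0 := pvRunP_result k "" t hrun
      rw [show ("" : String).toList = [] from rfl, List.nil_append] at h0
      exact (String.ofList_eq.mpr h0.symm).symm
    have hmem : t ∉ pvAccept := by
      rw [ht, pvAccept_eq]
      simp [h1, h2, h3, h4, h5, h6, h7, h8, h9, h10, h11, h12, h13, h14, h15, h16, h17, h18]
    simp [hmem]


-- ===== VERDICT (by name: the statement is the Claim_ definition above) =====
theorem canonical_filter_name_py_spec : Claim_equal_canonical_filter_name_py := by
  intro name _hdom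
  unfold Spec_canonical_filter_name_py canonical_filter_name_py canonical_filter_name_py_alt
  simp only [PySem.Str.upper, PySem.Str.strip, String.toList_ofList]
  rw [pvRun_eq_runP_filter]
  rw [show ((PySem.Chars.upper (PySem.Chars.strip name.toList)).filter pvPred)
        = ((PySem.Chars.upper name.toList).filter pvPred) from pvFilter_upper_strip _]
  set k := (PySem.Chars.upper name.toList).filter pvPred with hkdef
  have hk : ∀ c ∈ k, pvPred c = true := fun c hc => (List.mem_filter.mp hc).2
  by_cases hraw : String.ofList (PySem.Chars.upper (PySem.Chars.strip name.toList)) = ""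
  · rw [if_pos hraw]
    have hnil : PySem.Chars.upper (PySem.Chars.strip name.toList) = [] := by
      have := congrArg String.toList hraw
      rwa [String.toList_ofList] at this
    have hke : k = [] := by
      rw [hkdef, ← pvFilter_upper_strip, hnil, List.filter_nil]
    rw [hke]
    decide
  · rw [if_neg hraw]
    exact pvCore k hk
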